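-- pv_equiv track=rewrite | github.com/CFFinch62/PLAIN | plain_converter/utils/formatting.py | dedent_code
-- ===== SOURCE A (Python) =====
-- INDENT = "    "  # 4 spaces for both Python and PLAIN
--
-- def dedent_code(code: str, level: int = 1) -> str:
--     """
--     Remove indentation from a block of code.
--
--     Args:
--         code: The code to dedent.
--         level: Number of indentation levels to remove (default: 1).
--
--     Returns:
--         The dedented code.
--     """
--     prefix = INDENT * level
--     lines = code.split('\n')
--     dedented = []
--     for line in lines:
--         if line.startswith(prefix):
--             dedented.append(line[len(prefix):])
--         else:
--             dedented.append(line)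
--     return '\n'.join(dedented)
-- ===== SOURCE B (Python) =====
-- INDENT = "    "  # 4 spaces for both Python and PLAIN
--
--
-- def dedent_code(code: str, level: int = 1) -> str:
--     """Single left-to-right scan over the string: at each line start, skip one
--     copy of the indentation prefix if present; copy every other character."""
--     prefix = INDENT * level
--     out = []
--     i, at_start = 0, True
--     while i < len(code):
--         if at_start and prefix and code.startswith(prefix, i):
--             i += len(prefix)
--             at_start = False
--             continue
--         c = code[i]
--         out.append(c)
--         at_start = c == '\n'
--         i += 1
--     return ''.join(out)
-- ===== Notes on version B (the rewrite author's own statement) =====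
-- stated objective: alternative
-- what changed: Replaced A's split-into-lines / per-line startswith / join pipeline by a single left-to-right scan over the string that strips one indentation prefix at each line start and copies every other character.
import Mathlib
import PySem

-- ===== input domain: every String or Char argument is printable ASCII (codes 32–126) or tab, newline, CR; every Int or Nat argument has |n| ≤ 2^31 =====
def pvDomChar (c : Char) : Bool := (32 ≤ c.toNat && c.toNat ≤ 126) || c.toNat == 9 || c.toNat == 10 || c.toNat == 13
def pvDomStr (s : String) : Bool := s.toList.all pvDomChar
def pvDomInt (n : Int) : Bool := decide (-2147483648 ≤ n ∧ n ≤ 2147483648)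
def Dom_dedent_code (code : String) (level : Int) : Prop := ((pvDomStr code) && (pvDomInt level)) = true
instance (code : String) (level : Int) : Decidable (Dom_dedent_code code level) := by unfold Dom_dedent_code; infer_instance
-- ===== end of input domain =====

-- B replaces A's split-into-lines / per-line startswith / join pipeline by a single
-- left-to-right scan that strips the prefix at each line start (objective: alternative, same cost).

-- ===== PORT A =====
def dedent_code (code : String) (level : Int) : String :=
  let pfx := PySem.List.pyRepeat "    ".toList level
  let lines := PySem.Chars.splitOn code.toList ['\n']
  let dedented := lines.foldl (fun acc line =>
    if PySem.Chars.startswith line pfx then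
      acc ++ [PySem.Chars.slice line (some (pfx.length : Int)) none]
    else
      acc ++ [line]) []
  String.ofList (PySem.Chars.join ['\n'] dedented)

-- ===== PORT B =====
-- the while-loop of Source B: remaining characters + the at_start flag
def dedentGo (p : List Char) (cs : List Char) (atStart : Bool) : List Char :=
  if atStart && !p.isEmpty && p.isPrefixOf cs then
    dedentGo p (cs.drop p.length) false
  else
    match cs with
    | [] => []
    | c :: rest => c :: dedentGo p rest (c == '\n')
termination_by cs.length * 2 + (if atStart then 1 else 0)
decreasing_by
  · rename_i h
    simp only [Bool.and_eq_true, Bool.not_eq_true', List.isEmpty_eq_false_iff] at h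
    have h1 : p.length ≤ cs.length := (List.isPrefixOf_iff_prefix.mp h.2).length_le
    have h2 : 0 < p.length := List.length_pos_iff.mpr h.1.2
    simp only [List.length_drop]
    split_ifs <;> omega
  · simp only [List.length_cons]
    split_ifs <;> omega

def dedent_code_alt (code : String) (level : Int) : String :=
  let pfx := PySem.List.pyRepeat "    ".toList level
  String.ofList (dedentGo pfx code.toList true)

-- ===== PRECONDITION & SPEC =====
def Spec_dedent_code (code : String) (level : Int) (out : String) : Prop := out = dedent_code_alt code level
instance (code : String) (level : Int) (out : String) : Decidable (Spec_dedent_code code level out) := by unfold Spec_dedent_code; infer_instance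

-- ===== CLAIM (what is proved, stated in full; the proofs are below) =====
def Claim_equal_dedent_code : Prop := ∀ (code : String) (level : Int), Dom_dedent_code code level → Spec_dedent_code code level (dedent_code code level)

-- ===== LEMMAS AND PROOFS =====

-- reference line splitting: what Python's code.split('\n') produces
def pvLines : List Char → List (List Char)
  | [] => [[]]
  | c :: rest =>
    if c = '\n' then [] :: pvLines rest
    else
      match pvLines rest with
      | [] => [[c]]
      | l :: ls => (c :: l) :: ls

def pvStrip (p l : List Char) : List Char :=
  if p.isPrefixOf l then l.drop p.length else l

theorem pvLines_ne_nil (cs : List Char) : pvLines cs ≠ [] := by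
  cases cs with
  | nil => simp [pvLines]
  | cons c rest =>
    simp only [pvLines]
    split
    · simp
    · split <;> simp

theorem pvLines_head_prefix (cs l : List Char) (ls : List (List Char))
    (h : pvLines cs = l :: ls) : l <+: cs := by
  induction cs generalizing l ls with
  | nil =>
    simp only [pvLines, List.cons.injEq] at h
    simp [← h.1]
  | cons c rest ih =>
    simp only [pvLines] at h
    split at h
    · simp only [List.cons.injEq] at h
      simp [← h.1]
    · rename_i hc
      cases hrec : pvLines rest with
      | nil => exact absurd hrec (pvLines_ne_nil rest)
      | cons x xs =>
        rw [hrec] at h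
        simp only [List.cons.injEq] at h
        obtain ⟨h1, h2⟩ := h
        rw [← h1]
        exact (List.cons_prefix_cons).mpr ⟨rfl, ih x xs hrec⟩

theorem splitOn_go_eq (fuel : Nat) : ∀ (l cur : List Char) (accs : List (List Char)),
    l.length ≤ fuel →
    PySem.Chars.splitOn.go ['\n'] fuel l cur accs =
      accs.reverse ++ (match pvLines l with
        | [] => []
        | x :: xs => (cur.reverse ++ x) :: xs) := by
  induction fuel with
  | zero =>
    intro l cur accs hlen
    have hl : l = [] := List.eq_nil_of_length_eq_zero (Nat.le_zero.mp hlen)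
    subst hl
    simp [PySem.Chars.splitOn.go, pvLines]
  | succ fuel ih =>
    intro l cur accs hlen
    cases l with
    | nil => simp [PySem.Chars.splitOn.go, pvLines]
    | cons c rest =>
      rw [PySem.Chars.splitOn.go]
      by_cases hc : c = '\n'
      · subst hc
        have hpre : List.isPrefixOf ['\n'] ('\n' :: rest) = true := by
          simp [List.isPrefixOf]
        simp only [hpre, if_true, List.length_cons, List.length_nil,
          Nat.zero_add, List.drop_succ_cons, List.drop_zero]
        rw [ih rest [] (cur.reverse :: accs)
          (by simp at hlen; omega)]
        cases hrec : pvLines rest with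
        | nil => exact absurd hrec (pvLines_ne_nil rest)
        | cons x xs => simp [pvLines, hrec]
      · have hpre : List.isPrefixOf ['\n'] (c :: rest) = false := by
          simp only [List.isPrefixOf, Bool.and_eq_false_iff, beq_eq_false_iff_ne, ne_eq]
          exact Or.inl (fun h => hc h.symm)
        simp only [hpre, Bool.false_eq_true, if_false]
        rw [ih rest (c :: cur) accs (by simp at hlen; omega)]
        cases hrec : pvLines rest with
        | nil => exact absurd hrec (pvLines_ne_nil rest)
        | cons x xs => simp [pvLines, hrec, hc]

theorem splitOn_eq_pvLines (cs : List Char) :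
    PySem.Chars.splitOn cs ['\n'] = pvLines cs := by
  rw [PySem.Chars.splitOn, splitOn_go_eq (cs.length + 1) cs [] [] (by omega)]
  cases hrec : pvLines cs with
  | nil => exact absurd hrec (pvLines_ne_nil cs)
  | cons x xs => simp

theorem pvLines_drop (p : List Char) (hp : ∀ ch ∈ p, ch ≠ '\n') :
    ∀ (cs l : List Char) (ls : List (List Char)),
    p.isPrefixOf cs → pvLines cs = l :: ls →
    p.isPrefixOf l ∧ pvLines (cs.drop p.length) = l.drop p.length :: ls := by
  induction p with
  | nil =>
    intro cs l ls _ h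
    simpa [List.isPrefixOf] using h
  | cons a p' ih =>
    intro cs l ls hpre h
    have ha : a ≠ '\n' := hp a (List.mem_cons_self ..)
    cases cs with
    | nil => simp [List.isPrefixOf] at hpre
    | cons c cs' =>
      simp only [List.isPrefixOf, Bool.and_eq_true, beq_iff_eq] at hpre
      obtain ⟨hac, hpre'⟩ := hpre
      subst hac
      simp only [pvLines, if_neg ha] at h
      cases hrec : pvLines cs' with
      | nil => exact absurd hrec (pvLines_ne_nil cs')
      | cons x xs =>
        rw [hrec] at h
        simp only [List.cons.injEq] at h
        obtain ⟨h1, h2⟩ := h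
        have := ih (fun ch hch => hp ch (List.mem_cons_of_mem a hch)) cs' x xs hpre' hrec
        subst h2
        refine ⟨?_, ?_⟩
        · rw [← h1]
          simp [List.isPrefixOf, this.1]
        · rw [← h1]
          simpa using this.2

theorem join_cons_cons' (c : Char) (l : List Char) (ls : List (List Char)) :
    PySem.Chars.join ['\n'] ((c :: l) :: ls) = c :: PySem.Chars.join ['\n'] (l :: ls) := by
  cases ls <;> simp [PySem.Chars.join, List.intercalate]

theorem join_nil_cons (x : List Char) (ls : List (List Char)) :
    PySem.Chars.join ['\n'] ([] :: x :: ls) = '\n' :: PySem.Chars.join ['\n'] (x :: ls) := by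
  cases ls <;> simp [PySem.Chars.join, List.intercalate]

theorem dedentGo_false_of_not (p cs : List Char) (atStart : Bool)
    (h : ¬(p ≠ [] ∧ p.isPrefixOf cs = true)) :
    dedentGo p cs atStart = dedentGo p cs false := by
  have hc : (!p.isEmpty && p.isPrefixOf cs) = false := by
    by_cases hp : p = []
    · simp [hp]
    · cases hpc : p.isPrefixOf cs
      · simp
      · exact absurd ⟨hp, hpc⟩ h
  conv_lhs => rw [dedentGo.eq_def]
  conv_rhs => rw [dedentGo.eq_def]
  cases atStart <;> simp [hc]

theorem pvLines_cons_nl (rest : List Char) : pvLines ('\n' :: rest) = [] :: pvLines rest := by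
  simp [pvLines]

theorem pvLines_cons_ne (c : Char) (rest x : List Char) (xs : List (List Char))
    (hc : c ≠ '\n') (h : pvLines rest = x :: xs) :
    pvLines (c :: rest) = (c :: x) :: xs := by
  simp [pvLines, hc, h]

theorem dedentGo_nil (p : List Char) (b : Bool) : dedentGo p [] b = [] := by
  rw [dedentGo.eq_def]
  cases b
  · simp
  · cases p <;> simp [List.isPrefixOf]

theorem dedentGo_cons_false (p : List Char) (c : Char) (rest : List Char) :
    dedentGo p (c :: rest) false = c :: dedentGo p rest (c == '\n') := by
  conv_lhs => rw [dedentGo.eq_def]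
  simp

theorem dedentGo_true_strip (p cs : List Char) (hne : p ≠ [])
    (hpre : p.isPrefixOf cs = true) :
    dedentGo p cs true = dedentGo p (cs.drop p.length) false := by
  conv_lhs => rw [dedentGo.eq_def]
  simp [hne, hpre]

theorem dedentGo_main (p : List Char) (hp : ∀ ch ∈ p, ch ≠ '\n') : ∀ (n : Nat) (cs : List Char),
    cs.length ≤ n →
    (∀ l ls, pvLines cs = l :: ls →
      dedentGo p cs false = PySem.Chars.join ['\n'] (l :: ls.map (pvStrip p))) ∧
    dedentGo p cs true = PySem.Chars.join ['\n'] ((pvLines cs).map (pvStrip p)) := by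
  intro n
  induction n with
  | zero =>
    intro cs hlen
    have hcs : cs = [] := List.eq_nil_of_length_eq_zero (Nat.le_zero.mp hlen)
    subst hcs
    constructor
    · intro l ls h
      simp only [pvLines, List.cons.injEq] at h
      obtain ⟨h1, h2⟩ := h
      subst h1; subst h2
      rw [dedentGo_nil]
      simp [PySem.Chars.join, List.intercalate]
    · rw [dedentGo_nil]
      simp only [pvLines, List.map_cons, List.map_nil]
      unfold pvStrip
      split <;> simp [PySem.Chars.join, List.intercalate]
  | succ n ih =>
    intro cs hlen
    have hQ : ∀ l ls, pvLines cs = l :: ls →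
        dedentGo p cs false = PySem.Chars.join ['\n'] (l :: ls.map (pvStrip p)) := by
      intro l ls h
      cases cs with
      | nil =>
        simp only [pvLines, List.cons.injEq] at h
        obtain ⟨h1, h2⟩ := h
        subst h1; subst h2
        rw [dedentGo_nil]
        simp [PySem.Chars.join, List.intercalate]
      | cons c rest =>
        have hlen' : rest.length ≤ n := by simp at hlen; omega
        rw [dedentGo_cons_false]
        by_cases hc : c = '\n'
        · subst hc
          rw [pvLines_cons_nl] at h
          injection h with h1 h2
          subst h1
          cases hrec : pvLines rest with
          | nil => exact absurd hrec (pvLines_ne_nil rest)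
          | cons x xs =>
            have hP := (ih rest hlen').2
            have hbeq : (('\n' : Char) == '\n') = true := by decide
            rw [hbeq, hP, hrec, ← h2, hrec]
            simp only [List.map_cons]
            rw [join_nil_cons]
        · cases hrec : pvLines rest with
          | nil => exact absurd hrec (pvLines_ne_nil rest)
          | cons x xs =>
            rw [pvLines_cons_ne c rest x xs hc hrec] at h
            injection h with h1 h2
            have hQr := (ih rest hlen').1 x xs hrec
            rw [show ((c == '\n')) = false from beq_eq_false_iff_ne.mpr hc, hQr, ← h1, ← h2]
            rw [join_cons_cons']
    refine ⟨hQ, ?_⟩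
    obtain ⟨l, ls, hl⟩ : ∃ l ls, pvLines cs = l :: ls := by
      cases hrec : pvLines cs with
      | nil => exact absurd hrec (pvLines_ne_nil cs)
      | cons x xs => exact ⟨x, xs, rfl⟩
    by_cases hg : p ≠ [] ∧ p.isPrefixOf cs = true
    · obtain ⟨hne, hpre⟩ := hg
      have hd := pvLines_drop p hp cs l ls hpre hl
      have hplen : 0 < p.length := List.length_pos_iff.mpr hne
      have hle : p.length ≤ cs.length := (List.isPrefixOf_iff_prefix.mp hpre).length_le
      have hlen' : (cs.drop p.length).length ≤ n := by
        simp only [List.length_drop]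
        omega
      rw [dedentGo_true_strip p cs hne hpre,
        (ih (cs.drop p.length) hlen').1 (l.drop p.length) ls hd.2, hl]
      simp only [List.map_cons]
      have : pvStrip p l = l.drop p.length := by simp [pvStrip, hd.1]
      rw [this]
    · rw [dedentGo_false_of_not p cs true hg, hQ l ls hl, hl]
      simp only [List.map_cons]
      have : pvStrip p l = l := by
        unfold pvStrip
        by_cases hpn : p = []
        · simp [hpn]
        · have hpl : p.isPrefixOf l = false := by
            cases hpl : p.isPrefixOf l
            · rfl
            · have hlc := pvLines_head_prefix cs l ls hl
              have hpc : p <+: cs := (List.isPrefixOf_iff_prefix.mp hpl).trans hlc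
              exact absurd ⟨hpn, List.isPrefixOf_iff_prefix.mpr hpc⟩ hg
          simp [hpl]
      rw [this]

theorem pyRepeat_spaces (level : Int) (ch : Char)
    (h : ch ∈ PySem.List.pyRepeat "    ".toList level) : ch ≠ '\n' := by
  simp only [PySem.List.pyRepeat, List.mem_flatten, List.mem_replicate] at h
  obtain ⟨l, ⟨_, hl⟩, hch⟩ := h
  subst hl
  have hs : "    ".toList = [' ', ' ', ' ', ' '] := by rfl
  rw [hs] at hch
  simp only [List.mem_cons, List.not_mem_nil, or_false] at hch
  rcases hch with h | h | h | h <;> simp [h]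

-- ===== VERDICT (by name: the statement is the Claim_ definition above) =====
theorem dedent_code_spec : Claim_equal_dedent_code := by
  intro code level _
  unfold Spec_dedent_code dedent_code dedent_code_alt
  simp only [splitOn_eq_pvLines]
  have hbody : (fun (acc : List (List Char)) line =>
      if PySem.Chars.startswith line (PySem.List.pyRepeat "    ".toList level) then
        acc ++ [PySem.Chars.slice line (some ((PySem.List.pyRepeat "    ".toList level).length : Int)) none]
      else acc ++ [line]) =
      (fun acc line => acc ++ [pvStrip (PySem.List.pyRepeat "    ".toList level) line]) := by
    funext acc line
    simp only [PySem.Chars.startswith, PySem.Chars.slice, PySem.List.slice_from_natCast,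
      pvStrip]
    split <;> rfl
  rw [hbody, PySem.List.foldl_append_singleton_eq_map]
  rw [((dedentGo_main (PySem.List.pyRepeat "    ".toList level)
    (pyRepeat_spaces level) code.toList.length code.toList le_rfl).2)]
  simp
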